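-- pv_equiv track=rewrite | github.com/TRASALBY/Problem-Solving | Programers/Level2/전화번호 목록.py | solution
-- ===== SOURCE A (Python) =====
-- def solution(phone_book):
--
--     phone_book.sort()
--
--     for i in range(len(phone_book)):
--         num_len = len(phone_book[i])
--         for j in range(i+1,len(phone_book)):
--             if phone_book[i] == phone_book[j][0:num_len]:
--                 return False
--             else:
--                 break
--
--
--     return True
-- ===== SOURCE B (Python) =====
-- def solution(phone_book):
--     # sorts phone_book in place like the original; return value is hash-set based
--     phone_book.sort()
--     s = set(phone_book)
--     if len(s) != len(phone_book):
--         return False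
--     for num in phone_book:
--         for i in range(len(num)):
--             if num[:i] in s:
--                 return False
--     return True
-- ===== Notes on version B (the rewrite author's own statement) =====
-- stated objective: alternative
-- what changed: A scans the sorted list and compares each entry with its adjacent successor's slice; B instead builds a set of the numbers, rejects duplicates by a length check, and looks up every proper prefix of every number in that set.
import Mathlib
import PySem

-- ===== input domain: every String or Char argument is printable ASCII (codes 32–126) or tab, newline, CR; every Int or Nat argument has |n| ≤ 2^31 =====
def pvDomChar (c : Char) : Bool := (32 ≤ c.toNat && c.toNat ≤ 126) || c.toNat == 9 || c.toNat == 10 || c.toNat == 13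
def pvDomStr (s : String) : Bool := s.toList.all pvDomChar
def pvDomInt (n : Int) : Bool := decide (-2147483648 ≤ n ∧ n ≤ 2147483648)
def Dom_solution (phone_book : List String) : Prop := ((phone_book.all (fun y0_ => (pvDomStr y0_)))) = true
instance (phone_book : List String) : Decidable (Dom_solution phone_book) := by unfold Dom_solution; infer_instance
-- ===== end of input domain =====

-- B replaces A's sorted-adjacency prefix scan by a duplicate check plus hash-set lookups of
-- every proper prefix; equivalence is about the RETURN value (both sort the argument in place).

-- ===== PORT A =====
-- inner loop 'for j in range(i+1, len(pb)): if pb[i] == pb[j][0:num_len]: return False; else: break'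
def solAInner (pb : List String) (s : String) (numLen : Int) (js : List Int) : Bool :=
  match js with
  | [] => false
  | j :: _ =>
    if s == PySem.Str.slice (PySem.List.pyGetD pb j "") (some 0) (some numLen) then true
    else false  -- 'else: break'

-- outer loop 'for i in range(len(pb))'
def solAOuter (pb : List String) (is : List Int) : Bool :=
  match is with
  | [] => true
  | i :: rest =>
    if solAInner pb (PySem.List.pyGetD pb i "") (PySem.Str.len (PySem.List.pyGetD pb i ""))
        (PySem.List.pyRange (i + 1) (PySem.List.len pb)) then false
    else solAOuter pb rest

def solution (phone_book : List String) : Bool :=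
  let pb := PySem.List.sorted phone_book (fun x => x) false
  solAOuter pb (PySem.List.pyRange 0 (PySem.List.len pb))

-- ===== PORT B =====
-- inner loop 'for i in range(len(num)): if num[:i] in s: return False'
def solBInner (s : PySem.Set String) (num : String) (is : List Int) : Bool :=
  match is with
  | [] => false
  | i :: rest =>
    if PySem.Set.contains s (PySem.Str.slice num (some 0) (some i)) then true
    else solBInner s num rest

-- outer loop 'for num in phone_book'
def solBOuter (s : PySem.Set String) (nums : List String) : Bool :=
  match nums with
  | [] => true
  | num :: rest =>
    if solBInner s num (PySem.List.pyRange 0 (PySem.Str.len num)) then false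
    else solBOuter s rest

def solution_alt (phone_book : List String) : Bool :=
  let pb := PySem.List.sorted phone_book (fun x => x) false
  let s : PySem.Set String := PySem.Set.ofList pb
  if PySem.List.len s ≠ PySem.List.len pb then false
  else solBOuter s pb

-- ===== PRECONDITION & SPEC =====
def Spec_solution (phone_book : List String) (out : Bool) : Prop := out = solution_alt phone_book
instance (phone_book : List String) (out : Bool) : Decidable (Spec_solution phone_book out) := by unfold Spec_solution; infer_instance

-- ===== CLAIM (what is proved, stated in full; the proofs are below) =====
def Claim_equal_solution : Prop := ∀ (phone_book : List String), Dom_solution phone_book → Spec_solution phone_book (solution phone_book)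

-- ===== LEMMAS AND PROOFS =====

-- the common characterisation: the sorted list has an (adjacent) prefix pair
def PvHasPair (ys : List String) : Prop :=
  ∃ k : Nat, ∃ h : k + 1 < ys.length,
    (ys[k]'(Nat.lt_of_succ_lt h)).toList <+: (ys[k + 1]'h).toList

theorem pv_slice_toList_take (num : String) (i : Nat) :
    (PySem.Str.slice num (some 0) (some (i : Int))).toList = num.toList.take i := by
  rw [PySem.Str.toList_slice]
  simp [PySem.Chars.slice_eq_listSlice, PySem.List.slice_to_natCast]

theorem pv_prefix_slice_iff (x y : String) :
    (x == PySem.Str.slice y (some 0) (some (PySem.Str.len x))) = true ↔ x.toList <+: y.toList := by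
  rw [beq_iff_eq, PySem.Str.len_eq, String.ext_iff, pv_slice_toList_take,
    List.prefix_iff_eq_take]

theorem pv_properPrefix_lex {x y : List Char} (h : x <+: y) (hne : x ≠ y) :
    List.Lex (· < ·) x y := by
  induction x generalizing y with
  | nil =>
    cases y with
    | nil => exact absurd rfl hne
    | cons b t => exact List.Lex.nil
  | cons a x ih =>
    obtain ⟨t, rfl⟩ := h
    refine List.Lex.cons (ih ⟨t, rfl⟩ ?_)
    intro he
    exact hne (by simpa using congrArg (a :: ·) he)

theorem pv_lex_between {x z y : List Char} (hzx : ¬ List.Lex (· < ·) z x)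
    (hyz : ¬ List.Lex (· < ·) y z) (hxy : x <+: y) : x <+: z := by
  induction x generalizing z y with
  | nil => exact List.nil_prefix
  | cons a x ih =>
    obtain ⟨t, hy⟩ := hxy
    cases z with
    | nil => exact absurd List.Lex.nil hzx
    | cons c z =>
      rcases lt_trichotomy a c with hac | hac | hac
      · exact absurd (hy ▸ List.Lex.rel hac) hyz
      · subst hac
        have h1 : ¬ List.Lex (· < ·) z x := fun hl => hzx (List.Lex.cons hl)
        have h2 : ¬ List.Lex (· < ·) (x ++ t) z := fun hl => hyz (hy ▸ List.Lex.cons hl)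
        exact List.cons_prefix_cons.mpr ⟨rfl, ih h1 h2 ⟨t, rfl⟩⟩
      · exact absurd (List.Lex.rel hac) hzx

theorem pv_ofList_append_singleton (xs : List String) (x : String) :
    PySem.Set.ofList (xs ++ [x]) = PySem.Set.add (PySem.Set.ofList xs) x := by
  simp [PySem.Set.ofList_eq_foldl]

theorem pv_len_ofList_le (xs : List String) : (PySem.Set.ofList xs).length ≤ xs.length := by
  induction xs using List.reverseRecOn with
  | nil => simp [PySem.Set.ofList]
  | append_singleton xs x ih =>
    rw [pv_ofList_append_singleton]
    by_cases hm : x ∈ xs <;> simp [PySem.Set.add, hm] <;> omega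

theorem pv_len_ofList_eq_iff (xs : List String) :
    (PySem.Set.ofList xs).length = xs.length ↔ xs.Nodup := by
  induction xs using List.reverseRecOn with
  | nil => simp [PySem.Set.ofList]
  | append_singleton xs x ih =>
    rw [pv_ofList_append_singleton, List.nodup_append]
    have hle := pv_len_ofList_le xs
    by_cases hm : x ∈ xs
    · simp [PySem.Set.add, hm]
      constructor
      · intro hl; omega
      · rintro ⟨-, hnx⟩; exact absurd (hnx x hm rfl) (by simp)
    · simp [PySem.Set.add, hm]
      rw [← ih]
      constructor
      · intro h; exact ⟨by omega, fun a ha he => hm (he ▸ ha)⟩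
      · rintro ⟨h, -⟩; omega

theorem pv_solAOuter_false_iff (pb : List String) (is : List Int) :
    solAOuter pb is = false ↔ ∃ i ∈ is,
      solAInner pb (PySem.List.pyGetD pb i "") (PySem.Str.len (PySem.List.pyGetD pb i ""))
        (PySem.List.pyRange (i + 1) (PySem.List.len pb)) = true := by
  induction is with
  | nil => simp [solAOuter]
  | cons i rest ih =>
    show (if _ then false else solAOuter pb rest) = false ↔ _
    by_cases h : solAInner pb (PySem.List.pyGetD pb i "") (PySem.Str.len (PySem.List.pyGetD pb i ""))
        (PySem.List.pyRange (i + 1) (PySem.List.len pb)) = true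
    · rw [if_pos h]
      exact iff_of_true rfl ⟨i, List.mem_cons_self, h⟩
    · rw [if_neg h, ih]
      constructor
      · rintro ⟨j, hj, hjt⟩; exact ⟨j, List.mem_cons_of_mem _ hj, hjt⟩
      · rintro ⟨j, hj, hjt⟩
        rcases List.mem_cons.mp hj with rfl | hj'
        · exact absurd hjt h
        · exact ⟨j, hj', hjt⟩

theorem pv_solBInner_true_iff (s : PySem.Set String) (num : String) (is : List Int) :
    solBInner s num is = true ↔ ∃ i ∈ is,
      PySem.Set.contains s (PySem.Str.slice num (some 0) (some i)) = true := by
  induction is with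
  | nil => simp [solBInner]
  | cons i rest ih =>
    show (if _ then true else solBInner s num rest) = true ↔ _
    by_cases h : PySem.Set.contains s (PySem.Str.slice num (some 0) (some i)) = true
    · rw [if_pos h]
      exact iff_of_true rfl ⟨i, List.mem_cons_self, h⟩
    · rw [if_neg h, ih]
      constructor
      · rintro ⟨j, hj, hjt⟩; exact ⟨j, List.mem_cons_of_mem _ hj, hjt⟩
      · rintro ⟨j, hj, hjt⟩
        rcases List.mem_cons.mp hj with rfl | hj'
        · exact absurd hjt h
        · exact ⟨j, hj', hjt⟩

theorem pv_solBOuter_false_iff (s : PySem.Set String) (nums : List String) :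
    solBOuter s nums = false ↔ ∃ num ∈ nums,
      solBInner s num (PySem.List.pyRange 0 (PySem.Str.len num)) = true := by
  induction nums with
  | nil => simp [solBOuter]
  | cons num rest ih =>
    show (if _ then false else solBOuter s rest) = false ↔ _
    by_cases h : solBInner s num (PySem.List.pyRange 0 (PySem.Str.len num)) = true
    · rw [if_pos h]
      exact iff_of_true rfl ⟨num, List.mem_cons_self, h⟩
    · rw [if_neg h, ih]
      constructor
      · rintro ⟨j, hj, hjt⟩; exact ⟨j, List.mem_cons_of_mem _ hj, hjt⟩
      · rintro ⟨j, hj, hjt⟩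
        rcases List.mem_cons.mp hj with rfl | hj'
        · exact absurd hjt h
        · exact ⟨j, hj', hjt⟩

-- any prefix pair k < l in the sorted list yields an adjacent one at k
theorem pv_pair_to_adjacent (pb : List String) (k l : Nat) (hkl : k < l)
    (hl : l < (PySem.List.sorted pb (fun x => x) false).length)
    (hpre : ((PySem.List.sorted pb (fun x => x) false)[k]'(by omega)).toList <+:
            ((PySem.List.sorted pb (fun x => x) false)[l]'hl).toList) :
    PvHasPair (PySem.List.sorted pb (fun x => x) false) := by
  refine ⟨k, by omega, ?_⟩
  have h1 := PySem.List.sorted_id_getElem_mono pb (p := k) (q := k + 1) (by omega) (by omega)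
  have h2 := PySem.List.sorted_id_getElem_mono pb (p := k + 1) (q := l) (by omega) hl
  refine pv_lex_between (y := ((PySem.List.sorted pb (fun x => x) false)[l]'hl).toList) ?_ ?_ hpre
  · intro hlex
    exact absurd (String.lt_iff_toList_lt.mpr hlex) (not_lt.mpr h1)
  · intro hlex
    exact absurd (String.lt_iff_toList_lt.mpr hlex) (not_lt.mpr h2)

-- duplicate entries give two equal positions
theorem pv_not_nodup_pair (ys : List String) (h : ¬ ys.Nodup) :
    ∃ k l, ∃ (_ : k < ys.length) (hl : l < ys.length), k < l ∧ ys[k] = ys[l] := by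
  rw [List.nodup_iff_getElem?_ne_getElem?] at h
  push Not at h
  obtain ⟨i, j, hij, hjl, he⟩ := h
  exact ⟨i, j, by omega, hjl, hij,
    by simpa [List.getElem?_eq_getElem, hjl, show i < ys.length by omega] using he⟩

-- the inner loop of A inspects exactly the immediate successor
theorem pv_solAInner_eval (ys : List String) (s : String) (m : Int) (i : Int) :
    solAInner ys s m (PySem.List.pyRange (i + 1) (PySem.List.len ys)) = true ↔
      i + 1 < PySem.List.len ys ∧
        (s == PySem.Str.slice (PySem.List.pyGetD ys (i + 1) "") (some 0) (some m)) = true := by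
  by_cases h : i + 1 < PySem.List.len ys
  · rw [PySem.List.pyRange_one_cons h]
    show (if _ then true else false) = true ↔ _
    constructor
    · intro ht
      refine ⟨h, ?_⟩
      by_contra hc
      rw [if_neg hc] at ht
      exact Bool.false_ne_true ht
    · rintro ⟨-, hc⟩
      rw [if_pos hc]
  · rw [PySem.List.pyRange_one_eq_nil (by omega)]
    show false = true ↔ _
    constructor
    · intro ht; exact absurd ht Bool.false_ne_true
    · rintro ⟨hlt, -⟩; exact absurd hlt h

theorem pv_A_false_iff (pb : List String) :
    solution pb = false ↔ PvHasPair (PySem.List.sorted pb (fun x => x) false) := by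
  set ys := PySem.List.sorted pb (fun x => x) false with hys
  show solAOuter ys (PySem.List.pyRange 0 (PySem.List.len ys)) = false ↔ _
  rw [pv_solAOuter_false_iff]
  constructor
  · rintro ⟨i, hi, ht⟩
    obtain ⟨hi0, hin⟩ := PySem.List.mem_pyRange_one.mp hi
    obtain ⟨hlt, heq⟩ := (pv_solAInner_eval _ _ _ i).mp ht
    rw [PySem.List.len_eq] at hin hlt
    rw [PySem.List.pyGetD_eq_getElem ys "" hi0 (by omega),
        PySem.List.pyGetD_eq_getElem ys "" (by omega) (by omega)] at heq
    have hpre := (pv_prefix_slice_iff _ _).mp heq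
    have hidx : (i + 1).toNat = i.toNat + 1 := by omega
    simp only [hidx] at hpre
    exact ⟨i.toNat, by omega, hpre⟩
  · rintro ⟨k, hk, hpre⟩
    refine ⟨(k : Int), PySem.List.mem_pyRange_one.mpr
      ⟨by omega, by rw [PySem.List.len_eq]; exact_mod_cast Nat.lt_of_succ_lt hk⟩, ?_⟩
    rw [pv_solAInner_eval]
    have hcast : (k : Int) + 1 = ((k + 1 : Nat) : Int) := by push_cast; ring
    refine ⟨by rw [PySem.List.len_eq, hcast]; exact_mod_cast hk, ?_⟩
    rw [hcast, PySem.List.pyGetD_eq_getElem ys "" (by omega)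
        (by exact_mod_cast Nat.lt_of_succ_lt hk),
      PySem.List.pyGetD_eq_getElem ys "" (by omega) (by exact_mod_cast hk)]
    simp only [Int.toNat_natCast]
    exact (pv_prefix_slice_iff _ _).mpr hpre

theorem pv_B_false_iff (pb : List String) :
    solution_alt pb = false ↔ PvHasPair (PySem.List.sorted pb (fun x => x) false) := by
  set ys := PySem.List.sorted pb (fun x => x) false with hys
  show (if PySem.List.len (PySem.Set.ofList ys) ≠ PySem.List.len ys then false
        else solBOuter (PySem.Set.ofList ys) ys) = false ↔ _
  by_cases hnd : ys.Nodup
  · have hc : ¬ (PySem.List.len (PySem.Set.ofList ys) ≠ PySem.List.len ys) := by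
      rw [PySem.List.len_eq, PySem.List.len_eq, (pv_len_ofList_eq_iff ys).mpr hnd]
      simp
    rw [if_neg hc, pv_solBOuter_false_iff]
    constructor
    · rintro ⟨num, hnum, ht⟩
      obtain ⟨i, hi, hcont⟩ := (pv_solBInner_true_iff _ _ _).mp ht
      obtain ⟨hi0, hilen⟩ := PySem.List.mem_pyRange_one.mp hi
      rw [PySem.Str.len_eq] at hilen
      have hmem : PySem.Str.slice num (some 0) (some i) ∈ ys := by
        rw [← PySem.Set.mem_ofList]
        exact (PySem.Set.contains_iff _ _).mp hcont
      obtain ⟨l, hl, hleq⟩ := List.mem_iff_getElem.mp hnum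
      obtain ⟨k, hkk, hkeq⟩ := List.mem_iff_getElem.mp hmem
      have hicast : i = ((i.toNat : Nat) : Int) := by omega
      have hktake : (ys[k]'hkk).toList = num.toList.take i.toNat := by
        rw [hkeq, hicast, pv_slice_toList_take]
        simp
        omega
      have hnlt : i.toNat < num.toList.length := by omega
      have hklen : (ys[k]'hkk).toList.length = i.toNat := by
        rw [hktake, List.length_take]; omega
      have hkpre : (ys[k]'hkk).toList <+: (ys[l]'hl).toList := by
        rw [hktake, hleq]; exact List.take_prefix _ _
      rcases lt_trichotomy k l with hkl | hkl | hkl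
      · exact pv_pair_to_adjacent pb k l hkl hl hkpre
      · exfalso
        subst hkl
        rw [hleq] at hklen
        omega
      · exfalso
        have hle := PySem.List.sorted_id_getElem_mono pb (p := l) (q := k) (by omega) hkk
        have hnelen : (ys[k]'hkk).toList ≠ (ys[l]'hl).toList := by
          intro he
          rw [he, hleq] at hklen
          omega
        have hlex := pv_properPrefix_lex hkpre hnelen
        exact absurd (String.lt_iff_toList_lt.mpr hlex) (not_lt.mpr hle)
    · rintro ⟨k, hk, hpre⟩
      have hne : (ys[k]'(Nat.lt_of_succ_lt hk)).toList ≠ (ys[k+1]'hk).toList := by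
        intro he
        have : (ys[k]'(Nat.lt_of_succ_lt hk)) = (ys[k+1]'hk) := String.ext_iff.mpr he
        have := (List.Nodup.getElem_inj_iff hnd).mp this
        omega
      have hlenlt : (ys[k]'(Nat.lt_of_succ_lt hk)).toList.length < (ys[k+1]'hk).toList.length := by
        rcases Nat.lt_or_ge (ys[k]'(Nat.lt_of_succ_lt hk)).toList.length (ys[k+1]'hk).toList.length with h | h
        · exact h
        · exact absurd (List.IsPrefix.eq_of_length hpre
            (le_antisymm (List.IsPrefix.length_le hpre) h)) hne
      refine ⟨ys[k+1]'hk, List.getElem_mem hk, ?_⟩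
      rw [pv_solBInner_true_iff]
      refine ⟨((ys[k]'(Nat.lt_of_succ_lt hk)).toList.length : Int), PySem.List.mem_pyRange_one.mpr
        ⟨by omega, by rw [PySem.Str.len_eq]; exact_mod_cast hlenlt⟩, ?_⟩
      rw [PySem.Set.contains_iff, PySem.Set.mem_ofList]
      have : PySem.Str.slice (ys[k+1]'hk) (some 0)
          (some ((ys[k]'(Nat.lt_of_succ_lt hk)).toList.length : Int)) = ys[k]'(Nat.lt_of_succ_lt hk) := by
        rw [String.ext_iff, pv_slice_toList_take]
        exact (List.prefix_iff_eq_take.mp hpre).symm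
      rw [this]
      exact List.getElem_mem _
  · have hc : PySem.List.len (PySem.Set.ofList ys) ≠ PySem.List.len ys := by
      rw [PySem.List.len_eq, PySem.List.len_eq]
      intro he
      exact hnd ((pv_len_ofList_eq_iff ys).mp (by exact_mod_cast he))
    rw [if_pos hc]
    refine iff_of_true rfl ?_
    obtain ⟨k, l, hkk, hl, hkl, he⟩ := pv_not_nodup_pair ys hnd
    exact pv_pair_to_adjacent pb k l hkl hl (by rw [he])

-- ===== VERDICT (by name: the statement is the Claim_ definition above) =====
theorem solution_spec : Claim_equal_solution := by
  intro pb _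
  unfold Spec_solution
  have hA := pv_A_false_iff pb
  have hB := pv_B_false_iff pb
  cases hA' : solution pb <;> cases hB' : solution_alt pb <;> simp_all
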